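-- pv_equiv track=rewrite | github.com/c-olsson/AdventOfCode2023 | 13.py | evaluate_reflection
-- ===== SOURCE A (Python) =====
-- def count_mismatch(s1, s2):
--     assert len(s1) == len(s2)
--     mismatch = len(s1)
--     for i in range(len(s1)):
--         if s1[i] == s2[i]:
--             mismatch -= 1
--     return mismatch
--
-- def evaluate_reflection(pattern, start_row, smudge_used):
--     min_loop_len = min(start_row, len(pattern) - start_row)
--     for i in range(min_loop_len):
--         row1 = pattern[start_row - 1 - i]
--         row2 = pattern[start_row + i]
--         mm = count_mismatch(row1, row2)
--         if smudge_used and mm != 0: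
--             return False
--         elif mm == 1:
--             smudge_used = True
--         elif mm > 1:
--             return False
--     # "won't necessarily continue", implies it never is it seems
--     if smudge_used:
--         return True
--     else:
--         return False
-- ===== SOURCE B (Python) =====
-- def count_mismatch(s1, s2):
--     assert len(s1) == len(s2)
--     mismatch = len(s1)
--     for i in range(len(s1)):
--         if s1[i] == s2[i]:
--             mismatch -= 1
--     return mismatch
--
--
-- def evaluate_reflection(pattern, start_row, smudge_used):
--     # Pair each row above the axis with its mirror image below and count all
--     # mismatched cells at once: the reflection is valid iff the total equals
--     # the number of smudges still allowed (0 if one was already used, else 1).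
--     k = max(start_row, 0)
--     total = sum(count_mismatch(above, below)
--                 for above, below in zip(reversed(pattern[:k]), pattern[k:]))
--     return total == (0 if smudge_used else 1)
-- ===== Notes on version B (the rewrite author's own statement) =====
-- stated objective: simpler
-- what changed: Replaced A's early-exit state machine over a mutable smudge flag by a single comprehension that sums count_mismatch over the zipped mirror row-pairs and compares the total with the exact number of smudges still allowed.
-- outside the precondition, e.g. on evaluate_reflection(['abc', 'ab', 'cd', 'x'], 2, False): A returns False, B raises AssertionError
import Mathlib
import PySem

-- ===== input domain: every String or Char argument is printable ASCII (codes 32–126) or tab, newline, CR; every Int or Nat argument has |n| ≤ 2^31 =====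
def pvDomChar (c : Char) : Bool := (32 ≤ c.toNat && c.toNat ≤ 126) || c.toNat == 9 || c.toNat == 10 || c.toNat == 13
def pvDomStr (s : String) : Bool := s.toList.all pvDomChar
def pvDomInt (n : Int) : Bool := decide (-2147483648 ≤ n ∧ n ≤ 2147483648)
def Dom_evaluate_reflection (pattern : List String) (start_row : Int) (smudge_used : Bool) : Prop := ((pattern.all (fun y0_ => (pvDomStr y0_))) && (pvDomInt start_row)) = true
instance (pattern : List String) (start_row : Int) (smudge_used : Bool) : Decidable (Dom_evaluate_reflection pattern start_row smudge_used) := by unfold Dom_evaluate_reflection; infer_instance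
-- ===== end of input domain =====

-- B replaces A's early-exit smudge state machine by one sum of mismatches over the
-- zipped mirror row-pairs compared with the number of smudges still allowed (simpler).

-- ===== PORT A =====
-- count_mismatch: the Python assert raises on unequal lengths; those inputs are
-- excluded by Pre_ below, so the port just computes the fold (exact inside Pre_).
def count_mismatch (s1 s2 : String) : Int :=
  (PySem.List.pyRange 0 (s1.toList.length : Int) 1).foldl
    (fun mismatch i =>
      if PySem.List.pyGet? s1.toList i = PySem.List.pyGet? s2.toList i then mismatch - 1 else mismatch)
    (s1.toList.length : Int)

-- the body of A's for-loop with its three early-return branches, as structural recursion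
def evalLoop (pattern : List String) (start_row : Int) : List Int → Bool → Bool
  | [], smudge_used => smudge_used
  | i :: rest, smudge_used =>
    let row1 := PySem.List.pyGetD pattern (start_row - 1 - i) ""
    let row2 := PySem.List.pyGetD pattern (start_row + i) ""
    let mm := count_mismatch row1 row2
    if smudge_used ∧ mm ≠ 0 then false
    else if mm = 1 then evalLoop pattern start_row rest true
    else if mm > 1 then false
    else evalLoop pattern start_row rest smudge_used

def evaluate_reflection (pattern : List String) (start_row : Int) (smudge_used : Bool) : Bool :=
  let min_loop_len := min start_row ((pattern.length : Int) - start_row)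
  evalLoop pattern start_row (PySem.List.pyRange 0 min_loop_len 1) smudge_used

-- ===== PORT B =====
def evaluate_reflection_alt (pattern : List String) (start_row : Int) (smudge_used : Bool) : Bool :=
  let k := max start_row 0
  let total :=
    ((PySem.List.slice pattern none (some k)).reverse.zip
      (PySem.List.slice pattern (some k) none)).foldl
      (fun t p => t + count_mismatch p.1 p.2) 0
  total == (if smudge_used then (0 : Int) else 1)

-- ===== PRECONDITION & SPEC =====
-- Pre_ excludes inputs where some row pair inside the reflection window has unequal
-- lengths: there the Python assert raises (in A as soon as that pair is reached, in B
-- always); on those A reaches only after an early False-return, B's eager sum raises.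
def Pre_evaluate_reflection (pattern : List String) (start_row : Int) (smudge_used : Bool) : Prop :=
  ∀ i < (min start_row ((pattern.length : Int) - start_row)).toNat,
    (PySem.List.pyGetD pattern (start_row - 1 - (i : Int)) "").toList.length =
      (PySem.List.pyGetD pattern (start_row + (i : Int)) "").toList.length
instance (pattern : List String) (start_row : Int) (smudge_used : Bool) : Decidable (Pre_evaluate_reflection pattern start_row smudge_used) := by unfold Pre_evaluate_reflection; infer_instance

def pvWitness_evaluate_reflection : List String × Int × Bool := (["#.", "#.", "##"], 1, false)

def Spec_evaluate_reflection (pattern : List String) (start_row : Int) (smudge_used : Bool) (out : Bool) : Prop := out = evaluate_reflection_alt pattern start_row smudge_used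
instance (pattern : List String) (start_row : Int) (smudge_used : Bool) (out : Bool) : Decidable (Spec_evaluate_reflection pattern start_row smudge_used out) := by unfold Spec_evaluate_reflection; infer_instance

-- ===== CLAIM (what is proved, stated in full; the proofs are below) =====
def Claim_equal_evaluate_reflection : Prop := ∀ (pattern : List String) (start_row : Int) (smudge_used : Bool), Dom_evaluate_reflection pattern start_row smudge_used → Pre_evaluate_reflection pattern start_row smudge_used → Spec_evaluate_reflection pattern start_row smudge_used (evaluate_reflection pattern start_row smudge_used)

-- ===== LEMMAS AND PROOFS =====

-- abstract version of A's loop body over the list of mirror row-pairs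
def machineZip : List (String × String) → Bool → Bool
  | [], b => b
  | p :: rest, b =>
    let mm := count_mismatch p.1 p.2
    if b ∧ mm ≠ 0 then false
    else if mm = 1 then machineZip rest true
    else if mm > 1 then false
    else machineZip rest b

theorem foldl_sub_le (l : List Int) (f : Int → Int → Int)
    (hf : ∀ acc i, acc - 1 ≤ f acc i) (acc : Int) :
    acc - l.length ≤ l.foldl f acc := by
  induction l generalizing acc with
  | nil => simp
  | cons x xs ih =>
    have h1 := ih (f acc x)
    have h2 := hf acc x
    simp only [List.foldl_cons, List.length_cons] at *
    omega

theorem count_mismatch_nonneg (s1 s2 : String) : 0 ≤ count_mismatch s1 s2 := by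
  unfold count_mismatch
  have hlen : (PySem.List.pyRange 0 (s1.toList.length : Int) 1).length = s1.toList.length := by
    rw [PySem.List.pyRange_zero_natCast]
    simp
  have := foldl_sub_le (PySem.List.pyRange 0 (s1.toList.length : Int) 1)
    (fun mismatch i =>
      if PySem.List.pyGet? s1.toList i = PySem.List.pyGet? s2.toList i then mismatch - 1 else mismatch)
    (by intro acc i; dsimp only; split <;> omega) (s1.toList.length : Int)
  rw [hlen] at this
  omega

theorem foldl_add_cm (l : List (String × String)) (c : Int) :
    l.foldl (fun t p => t + count_mismatch p.1 p.2) c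
      = c + (l.map (fun p => count_mismatch p.1 p.2)).sum := by
  induction l generalizing c with
  | nil => simp
  | cons x xs ih => simp [ih]; ring

theorem sum_cm_nonneg (l : List (String × String)) :
    0 ≤ (l.map (fun p => count_mismatch p.1 p.2)).sum := by
  apply List.sum_nonneg
  intro x hx
  simp only [List.mem_map] at hx
  obtain ⟨p, _, rfl⟩ := hx
  exact count_mismatch_nonneg p.1 p.2

theorem machineZip_eq_sum (l : List (String × String)) (b : Bool) :
    machineZip l b
      = ((l.map (fun p => count_mismatch p.1 p.2)).sum == (if b then (0 : Int) else 1)) := by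
  induction l generalizing b with
  | nil => cases b <;> simp [machineZip]
  | cons p rest ih =>
    have hmm := count_mismatch_nonneg p.1 p.2
    have hS := sum_cm_nonneg rest
    cases b with
    | true =>
      simp only [machineZip, List.map_cons, List.sum_cons]
      by_cases h0 : count_mismatch p.1 p.2 = 0
      · simp [h0, ih]
      · have : ¬ ((count_mismatch p.1 p.2 + (rest.map (fun p => count_mismatch p.1 p.2)).sum) = (0:Int)) := by omega
        simp [h0, this]
    | false =>
      simp only [machineZip, List.map_cons, List.sum_cons]
      by_cases h1 : count_mismatch p.1 p.2 = 1
      · have : ∀ x : Int, (1 + x = 1) ↔ (x = 0) := by intro x; omega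
        simp [h1, ih, this]
      · by_cases h2 : count_mismatch p.1 p.2 > 1
        · have : ¬ ((count_mismatch p.1 p.2 + (rest.map (fun p => count_mismatch p.1 p.2)).sum) = (1:Int)) := by omega
          simp [h1, h2, this]
        · have h0 : count_mismatch p.1 p.2 = 0 := by omega
          simp [h0, ih]

theorem evalLoop_eq_machineZip (pattern : List String) (s : Int) (is : List Int) (b : Bool) :
    evalLoop pattern s is b
      = machineZip (is.map (fun i =>
          (PySem.List.pyGetD pattern (s - 1 - i) "", PySem.List.pyGetD pattern (s + i) ""))) b := by
  induction is generalizing b with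
  | nil => rfl
  | cons i rest ih => simp only [evalLoop, machineZip, List.map_cons, ih]

-- the index-generated pair list IS the zip of the reversed prefix with the suffix
theorem pairs_eq_zip (pattern : List String) (s : Int) :
    (PySem.List.pyRange 0 (min s ((pattern.length : Int) - s)) 1).map (fun i =>
        (PySem.List.pyGetD pattern (s - 1 - i) "", PySem.List.pyGetD pattern (s + i) ""))
      = (PySem.List.slice pattern none (some (max s 0))).reverse.zip
          (PySem.List.slice pattern (some (max s 0)) none) := by
  have hmax : (0:Int) ≤ max s 0 := le_max_right _ _
  rw [PySem.List.pyRange_one, PySem.List.slice_to pattern hmax, PySem.List.slice_from pattern hmax]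
  rcases lt_or_ge s 0 with hs | hs
  · -- s < 0 : empty range on the left, empty taken prefix on the right
    have h2 : (max s 0).toNat = 0 := by omega
    simp [h2]
    omega
  rcases lt_or_ge (pattern.length : Int) s with hn | hn
  · -- s > len : empty range on the left, empty suffix on the right
    have h1 : (min s ((pattern.length : Int) - s) - 0).toNat = 0 := by omega
    have h2 : pattern.length ≤ (max s 0).toNat := by omega
    simp [List.drop_eq_nil_of_le h2]
    omega
  · -- 0 ≤ s ≤ len
    obtain ⟨j, rfl⟩ : ∃ j : Nat, s = (j : Int) := ⟨s.toNat, (Int.toNat_of_nonneg hs).symm⟩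
    have hmax' : (max (j:Int) 0).toNat = j := by omega
    rw [hmax']
    apply List.ext_getElem
    · simp only [List.length_map, List.length_range, List.length_zip,
        List.length_reverse, List.length_take, List.length_drop]
      omega
    · intro i h1 h2
      simp only [List.length_map, List.length_range] at h1
      simp only [List.getElem_map, List.getElem_range, List.getElem_zip,
        List.getElem_reverse, List.getElem_take, List.getElem_drop,
        List.length_take, zero_add]
      rw [PySem.List.pyGetD_eq_getElem pattern "" (by omega) (by omega),
        PySem.List.pyGetD_eq_getElem pattern "" (by omega) (by omega)]
      simp only [show ((j:Int) - 1 - (i:Int)).toNat = min j pattern.length - 1 - i from by omega,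
        show ((j:Int) + (i:Int)).toNat = j + i from by omega]
theorem evaluate_reflection_spec_aux (pattern : List String) (s : Int) (b : Bool) :
    evaluate_reflection pattern s b = evaluate_reflection_alt pattern s b := by
  simp only [evaluate_reflection, evaluate_reflection_alt]
  rw [evalLoop_eq_machineZip, pairs_eq_zip, machineZip_eq_sum, foldl_add_cm]
  simp

-- ===== VERDICT (by name: the statement is the Claim_ definition above) =====
theorem evaluate_reflection_spec : Claim_equal_evaluate_reflection := by
  intro pattern s b _ _
  exact evaluate_reflection_spec_aux pattern s b
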